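-- pv_equiv track=rewrite | github.com/kittykg/pyvent-of-code | 2023/day07.py | convert_card
-- ===== SOURCE A (Python) =====
-- def convert_card(hand: str) -> str:
--     # J is a wild card now
--     if "J" not in hand:
--         return hand
--
--     sorted_cards = sorted(
--         [(hand.count(card), card) for card in set(hand) if card != "J"]
--     )
--     if len(sorted_cards) == 0:
--         # All Js
--         return hand
--
--     _, max_card = sorted_cards[-1]
--     return hand.replace("J", max_card)
-- ===== SOURCE B (Python) =====
-- def convert_card(hand: str) -> str:
--     # J is a wild card now
--     if "J" not in hand:
--         return hand
--
--     # single running-max scan over the distinct cards instead of build-sort-index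
--     best = None
--     for card in set(hand):
--         if card == "J":
--             continue
--         if best is None or (hand.count(card), card) > (hand.count(best), best):
--             best = card
--
--     if best is None:
--         # All Js
--         return hand
--
--     return hand.replace("J", best)
-- ===== Notes on version B (the rewrite author's own statement) =====
-- stated objective: simpler
-- what changed: Replaces building a list of (count, card) pairs, sorting it and indexing the last element by a single running-max scan over the distinct cards with the same (count, card) tie-break.
import Mathlib
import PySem

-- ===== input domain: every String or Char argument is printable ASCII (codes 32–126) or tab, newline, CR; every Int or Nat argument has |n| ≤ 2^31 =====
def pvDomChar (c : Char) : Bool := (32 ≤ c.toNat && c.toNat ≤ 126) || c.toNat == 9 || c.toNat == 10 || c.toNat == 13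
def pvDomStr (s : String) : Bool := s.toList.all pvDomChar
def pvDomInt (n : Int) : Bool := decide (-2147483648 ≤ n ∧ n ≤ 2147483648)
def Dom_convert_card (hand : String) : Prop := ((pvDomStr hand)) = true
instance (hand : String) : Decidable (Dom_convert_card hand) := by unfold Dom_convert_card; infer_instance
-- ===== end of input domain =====

-- B replaces A's build-pairs/sort/take-last by a single running-max scan over the distinct cards (objective: simpler).

-- ===== PORT A =====
def convert_card (hand : String) : String :=
  if ¬ PySem.Str.isIn "J" hand then hand
  else
    let sorted_cards := PySem.List.sorted2
      (((PySem.Set.ofList hand.toList).filter (fun card => card != 'J')).map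
        (fun card => (((PySem.Str.count hand (String.ofList [card]) : Nat) : Int), card)))
      (fun p => p.1) (fun p => p.2)
    if sorted_cards.length = 0 then hand
    else
      let max_card := (PySem.List.pyGetD sorted_cards (-1) (0, 'J')).2
      PySem.Str.replace hand "J" (String.ofList [max_card])

-- ===== PORT B =====
def convert_card_alt (hand : String) : String :=
  if ¬ PySem.Str.isIn "J" hand then hand
  else
    let best := (PySem.Set.ofList hand.toList).foldl
      (fun (best : Option Char) card =>
        if card == 'J' then best
        else
          match best with
          | none => some card
          | some b =>
            if ((PySem.Str.count hand (String.ofList [card]) : Nat) : Int) > ((PySem.Str.count hand (String.ofList [b]) : Nat) : Int)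
                ∨ (((PySem.Str.count hand (String.ofList [card]) : Nat) : Int) = ((PySem.Str.count hand (String.ofList [b]) : Nat) : Int) ∧ b < card)
            then some card else some b) none
    match best with
    | none => hand
    | some b => PySem.Str.replace hand "J" (String.ofList [b])

-- ===== PRECONDITION & SPEC =====
def Spec_convert_card (hand : String) (out : String) : Prop := out = convert_card_alt hand
instance (hand : String) (out : String) : Decidable (Spec_convert_card hand out) := by unfold Spec_convert_card; infer_instance

-- ===== CLAIM (what is proved, stated in full; the proofs are below) =====
def Claim_equal_convert_card : Prop := ∀ (hand : String), Dom_convert_card hand → Spec_convert_card hand (convert_card hand)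


-- ===== LEMMAS AND PROOFS =====

-- the tuple order (k a, a) ≤ (k b, b), lexicographically
def pvLe (k : Char → Int) (a b : Char) : Prop := k a < k b ∨ (k a = k b ∧ a ≤ b)

theorem pvLe_refl (k : Char → Int) (a : Char) : pvLe k a a := Or.inr ⟨rfl, le_refl a⟩

theorem pvLe_trans (k : Char → Int) {a b c : Char} (h1 : pvLe k a b) (h2 : pvLe k b c) : pvLe k a c := by
  rcases h1 with h1 | ⟨h1, h1'⟩ <;> rcases h2 with h2 | ⟨h2, h2'⟩
  · exact Or.inl (by omega)
  · exact Or.inl (by omega)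
  · exact Or.inl (by omega)
  · exact Or.inr ⟨by omega, le_trans h1' h2'⟩

theorem pvLe_antisymm (k : Char → Int) {a b : Char} (h1 : pvLe k a b) (h2 : pvLe k b a) : a = b := by
  rcases h1 with h1 | ⟨h1, h1'⟩ <;> rcases h2 with h2 | ⟨h2, h2'⟩
  · omega
  · omega
  · omega
  · exact le_antisymm h1' h2'

-- B's running-max loop (after the J-filter is pulled out) computes a pvLe-maximum
theorem pv_fold_max (k : Char → Int) :
    ∀ (cs : List Char) (b0 : Char),
      ∃ m, cs.foldl (fun (best : Option Char) card =>
          match best with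
          | none => some card
          | some b => if k card > k b ∨ (k card = k b ∧ b < card) then some card else some b)
        (some b0) = some m ∧ (m = b0 ∨ m ∈ cs) ∧ pvLe k b0 m ∧ ∀ c ∈ cs, pvLe k c m := by
  intro cs
  induction cs with
  | nil => exact fun b0 => ⟨b0, rfl, Or.inl rfl, pvLe_refl k b0, by simp⟩
  | cons c cs ih =>
    intro b0
    by_cases h : k c > k b0 ∨ (k c = k b0 ∧ b0 < c)
    · obtain ⟨m, hm, hmem, hle, hall⟩ := ih c
      refine ⟨m, ?_, ?_, ?_, ?_⟩
      · simpa [List.foldl_cons, if_pos h] using hm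
      · rcases hmem with rfl | hmem
        · exact Or.inr (List.mem_cons_self)
        · exact Or.inr (List.mem_cons_of_mem _ hmem)
      · have hb0c : pvLe k b0 c := by
          rcases h with h | ⟨h, h'⟩
          · exact Or.inl (by omega)
          · exact Or.inr ⟨by omega, le_of_lt h'⟩
        exact pvLe_trans k hb0c hle
      · intro c' hc'
        rcases List.mem_cons.mp hc' with rfl | hc'
        · exact hle
        · exact hall c' hc'
    · obtain ⟨m, hm, hmem, hle, hall⟩ := ih b0
      refine ⟨m, ?_, ?_, ?_, ?_⟩
      · simpa [List.foldl_cons, if_neg h] using hm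
      · rcases hmem with rfl | hmem
        · exact Or.inl rfl
        · exact Or.inr (List.mem_cons_of_mem _ hmem)
      · exact hle
      · intro c' hc'
        rcases List.mem_cons.mp hc' with rfl | hc'
        · have hcb0 : pvLe k c' b0 := by
            rcases lt_trichotomy (k c') (k b0) with h1 | h1 | h1
            · exact Or.inl h1
            · exact Or.inr ⟨h1, not_lt.mp (fun hb => h (Or.inr ⟨h1, hb⟩))⟩
            · exact absurd (Or.inl h1) h
          exact pvLe_trans k hcb0 hle
        · exact hall c' hc'

-- sorting the (count, card) pairs IS sorting by the lexicographic order on Int × Char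
theorem pv_sorted2_eq_sorted_lex (xs : List (Int × Char)) :
    PySem.List.sorted2 xs (fun p => p.1) (fun p => p.2) =
      PySem.List.sorted xs (fun p => toLex p) := by
  rw [PySem.List.sorted_eq_foldl_insertBy]
  show List.foldl (fun acc x => PySem.List.insertBy
        (fun a b => decide (a.1 < b.1) || (!decide (b.1 < a.1) && decide (a.2 < b.2))) x acc) [] xs
      = List.foldl (fun acc x => PySem.List.insertBy
        (fun a b => decide (toLex a < toLex b)) x acc) [] xs
  have hfun : (fun (a b : Int × Char) => decide (a.1 < b.1) || (!decide (b.1 < a.1) && decide (a.2 < b.2)))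
      = (fun (a b : Int × Char) => decide (toLex a < toLex b)) := by
    funext a b
    by_cases h1 : a.1 < b.1 <;> by_cases h2 : b.1 < a.1 <;> by_cases h3 : a.2 < b.2 <;>
      simp [Prod.Lex.lt_iff, h1, h2, h3] <;> omega
  rw [hfun]

-- in a Pairwise-ordered list, every element is the last one or related to it
theorem pv_pairwise_getLast {α : Type} {R : α → α → Prop} {l : List α}
    (hp : l.Pairwise R) (h : l ≠ []) :
    ∀ x ∈ l, x = l.getLast h ∨ R x (l.getLast h) := by
  intro x hx
  obtain ⟨i, hi, hix⟩ := List.getElem_of_mem hx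
  rw [List.getLast_eq_getElem]
  rcases Nat.lt_or_ge i (l.length - 1) with h' | h'
  · right
    rw [← hix]
    exact (List.pairwise_iff_getElem.mp hp) i (l.length - 1) hi (by omega) h'
  · left
    rw [← hix]
    congr 1
    omega

-- ===== VERDICT (by name: the statement is the Claim_ definition above) =====
theorem convert_card_spec : Claim_equal_convert_card := by
  intro hand _dom
  unfold Spec_convert_card convert_card convert_card_alt
  by_cases hJ : PySem.Str.isIn "J" hand = true
  · simp only [hJ, not_true_eq_false, if_false]
    set k : Char → Int := fun c => ((PySem.Str.count hand (String.ofList [c]) : Nat) : Int) with hk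
    set cs : List Char := (PySem.Set.ofList hand.toList).filter (fun card => card != 'J') with hcs
    set pairs : List (Int × Char) := cs.map (fun card => (k card, card)) with hpairs
    -- B's guarded fold over the set = the unguarded fold over cs
    have hfoldB : (PySem.Set.ofList hand.toList).foldl
        (fun (best : Option Char) card =>
          if card == 'J' then best
          else match best with
            | none => some card
            | some b => if k card > k b ∨ (k card = k b ∧ b < card) then some card else some b) none
        = cs.foldl (fun (best : Option Char) card =>
            match best with
            | none => some card
            | some b => if k card > k b ∨ (k card = k b ∧ b < card) then some card else some b) none := by
      rw [hcs, List.foldl_filter]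
      congr 1
      funext b c
      by_cases h : c = 'J' <;> simp [h]
    rw [hfoldB]
    cases hcs' : cs with
    | nil =>
      have h0 : PySem.List.sorted2 (([] : List (Int × Char))) (fun p => p.1) (fun p => p.2) = [] := rfl
      simp [hpairs, hcs', h0]
    | cons c0 cs' =>
      -- B side: the fold produces a pvLe-maximum m of cs
      obtain ⟨m, hm, hmem, hle0, hall⟩ := pv_fold_max k cs' c0
      have hfold2 : (c0 :: cs').foldl (fun (best : Option Char) card =>
          match best with
          | none => some card
          | some b => if k card > k b ∨ (k card = k b ∧ b < card) then some card else some b) none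
          = some m := by
        rw [List.foldl_cons]
        exact hm
      have hmcs : m ∈ cs := by
        rw [hcs']
        rcases hmem with rfl | hmem
        · exact List.mem_cons_self
        · exact List.mem_cons_of_mem _ hmem
      have hallcs : ∀ c ∈ cs, pvLe k c m := by
        intro c hc
        rw [hcs'] at hc
        rcases List.mem_cons.mp hc with rfl | hc
        · exact hle0
        · exact hall c hc
      rw [hfold2]
      -- A side
      have hsc : PySem.List.sorted2 pairs (fun p => p.1) (fun p => p.2) =
          PySem.List.sorted pairs (fun p => toLex p) := pv_sorted2_eq_sorted_lex pairs
      set sc := PySem.List.sorted pairs (fun p => toLex p) with hscdef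
      have hperm : sc.Perm pairs := PySem.List.sorted_perm pairs _ false
      have hscne : sc ≠ [] := by
        intro h0
        have hlen := hperm.length_eq
        rw [h0, hpairs, hcs'] at hlen
        simp at hlen
      have hlen : ¬ sc.length = 0 := fun h0 => hscne (List.eq_nil_of_length_eq_zero h0)
      -- the last element of sc
      have hlmem : sc.getLast hscne ∈ pairs := hperm.mem_iff.mp (List.getLast_mem hscne)
      obtain ⟨cl, hclmem, hcl⟩ := List.mem_map.mp (by rw [hpairs] at hlmem; exact hlmem)
      have hpw := PySem.List.sorted_pairwise pairs (fun p : Int × Char => toLex p)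
      have hmax : ∀ c ∈ cs, pvLe k c cl := by
        intro c hc
        have hpin : (k c, c) ∈ sc := hperm.mem_iff.mpr (by rw [hpairs]; exact List.mem_map.mpr ⟨c, hc, rfl⟩)
        rcases pv_pairwise_getLast hpw hscne _ hpin with heq | hrel
        · rw [← hcl] at heq
          have hccl : c = cl := by
            have h2 := congrArg Prod.snd heq
            simpa using h2
          rw [hccl]; exact pvLe_refl k cl
        · rw [← hcl] at hrel
          rcases Prod.Lex.le_iff.mp hrel with h | ⟨h, h'⟩
          · exact Or.inl h
          · exact Or.inr ⟨h, h'⟩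
      -- the two maxima coincide
      have hmcl : m = cl := pvLe_antisymm k (hmax m hmcs) (hallcs cl hclmem)
      rw [hsc, if_neg hlen, PySem.List.pyGetD_neg_one sc (0, 'J') hscne, ← hcl, hmcl]
  · rw [if_pos hJ, if_pos hJ]
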